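-- pv_equiv track=rewrite | github.com/saininavneet29/CA-2- | utils.py | simple_ascii_table
-- ===== SOURCE A (Python) =====
-- from typing import List, Dict
--
-- def simple_ascii_table(headers: List[str], rows: List[List[str]]) -> str:
--     """
--     Minimal ASCII table generator used when Rich is not available.
--     """
--     widths = [len(h) for h in headers]
--     for r in rows:
--         for i, cell in enumerate(r):
--             if i >= len(widths):
--                 widths.append(len(cell))
--             else:
--                 widths[i] = max(widths[i], len(cell))
--     sep = "+" + "+".join("-" * (w + 2) for w in widths) + "+"
--     def fmt_row(r: List[str]) -> str:
--         cells = []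
--         for i, cell in enumerate(r):
--             cells.append(" " + cell.ljust(widths[i]) + " ")
--         return "|" + "|".join(cells) + "|"
--     lines = [sep, fmt_row(headers), sep]
--     for r in rows:
--         lines.append(fmt_row(r))
--     lines.append(sep)
--     return "\n".join(lines)
-- ===== SOURCE B (Python) =====
-- def simple_ascii_table(headers, rows):
--     """
--     Minimal ASCII table generator: materialize the transpose of the grid
--     (columns of existing cells), then take per-column maxima for the widths.
--     """
--     grid = [headers] + rows
--     ncols = max(len(r) for r in grid)
--     cols = [[] for _ in range(ncols)]
--     for r in grid:
--         for j, cell in enumerate(r):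
--             cols[j].append(cell)
--     widths = [max((len(cell) for cell in col), default=0) for col in cols]
--     sep = "+" + "+".join("-" * (w + 2) for w in widths) + "+"
--
--     def fmt_row(r):
--         return "|" + "|".join(" " + cell.ljust(widths[i]) + " " for i, cell in enumerate(r)) + "|"
--
--     return "\n".join([sep, fmt_row(headers), sep] + [fmt_row(r) for r in rows] + [sep])
-- ===== Notes on version B (the rewrite author's own statement) =====
-- stated objective: alternative
-- what changed: Column widths come from materializing the transpose of the grid (per-column lists of existing cells) and taking each column's maximum cell length, instead of A's widths list mutated/extended in place row by row; the table text is assembled with comprehensions and a single join instead of accumulator loops.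
import Mathlib
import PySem

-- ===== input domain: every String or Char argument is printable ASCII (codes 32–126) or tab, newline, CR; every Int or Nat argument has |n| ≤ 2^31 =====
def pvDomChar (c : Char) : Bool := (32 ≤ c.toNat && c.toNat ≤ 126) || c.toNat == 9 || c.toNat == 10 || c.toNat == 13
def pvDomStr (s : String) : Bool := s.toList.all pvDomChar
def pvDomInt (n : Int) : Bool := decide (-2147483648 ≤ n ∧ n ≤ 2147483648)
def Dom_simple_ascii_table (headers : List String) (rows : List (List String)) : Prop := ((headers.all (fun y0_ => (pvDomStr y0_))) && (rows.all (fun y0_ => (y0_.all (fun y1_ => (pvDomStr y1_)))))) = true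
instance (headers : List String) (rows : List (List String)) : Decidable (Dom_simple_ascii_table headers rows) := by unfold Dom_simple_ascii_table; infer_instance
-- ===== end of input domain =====

-- B materializes the transpose of the grid (columns of existing cells) and takes per-column
-- maxima for the widths, instead of A's mutated/extended running-maxima accumulator, and
-- assembles the lines with maps and a single join instead of accumulator loops (objective:
-- alternative; same output).


-- ===== PORT A =====

-- cell.ljust(w): exact — Python pads on the right with spaces up to width w (no-op if already
-- wider); Nat subtraction encodes the clamp.
def pvLjust (cs : List Char) (w : Nat) : List Char := cs ++ List.replicate (w - cs.length) ' '

-- the body of A's width loop over one row r ('for i, cell in enumerate(r): …'); zipIdx = enumerate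
def pvStepA (ws : List Nat) (r : List String) : List Nat :=
  r.zipIdx.foldl
    (fun ws ci =>
      if ws.length ≤ ci.2 then ws ++ [ci.1.toList.length]
      else ws.set ci.2 (max (ws.getD ci.2 0) ci.1.toList.length))
    ws

-- A's fmt_row: a cells-accumulator loop, then "|" + "|".join(cells) + "|"
-- (widths[i] is always in range after the width loop, so getD's default is never taken)
def pvFmtRowA (ws : List Nat) (r : List String) : List Char :=
  let cells := r.zipIdx.foldl (fun acc ci => acc ++ [[' '] ++ pvLjust ci.1.toList (ws.getD ci.2 0) ++ [' ']]) []
  ['|'] ++ PySem.Chars.join ['|'] cells ++ ['|']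

def simple_ascii_table (headers : List String) (rows : List (List String)) : String :=
  let widths := rows.foldl pvStepA (headers.map (fun h => h.toList.length))
  let sep := ['+'] ++ PySem.Chars.join ['+'] (widths.map (fun w => List.replicate (w + 2) '-')) ++ ['+']
  let lines := rows.foldl (fun ls r => ls ++ [pvFmtRowA widths r]) [sep, pvFmtRowA widths headers, sep]
  String.ofList (PySem.Chars.join ['\n'] (lines ++ [sep]))

-- ===== PORT B =====

-- the body of B's transpose loop over one row r ('for j, cell in enumerate(r): cols[j].append(cell)');
-- j < len(cols) always holds when called (every row is at most ncols long), so set is exact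
def pvColsStep (cols : List (List String)) (r : List String) : List (List String) :=
  r.zipIdx.foldl (fun cols ci => cols.set ci.2 (cols.getD ci.2 [] ++ [ci.1])) cols

-- B's fmt_row: a direct map over enumerate(r), joined
def pvFmtRowB (ws : List Nat) (r : List String) : List Char :=
  ['|'] ++ PySem.Chars.join ['|'] (r.zipIdx.map (fun ci => [' '] ++ pvLjust ci.1.toList (ws.getD ci.2 0) ++ [' '])) ++ ['|']

def simple_ascii_table_alt (headers : List String) (rows : List (List String)) : String :=
  let grid := headers :: rows
  -- max(len(r) for r in grid): grid is nonempty and lengths are Nats, so foldl max 0 is Python's max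
  let ncols := (grid.map List.length).foldl max 0
  let cols := grid.foldl pvColsStep (List.replicate ncols ([] : List String))
  -- max(..., default=0) over Nats is exactly foldl max 0
  let widths := cols.map (fun col => (col.map (fun c => c.toList.length)).foldl max 0)
  let sep := ['+'] ++ PySem.Chars.join ['+'] (widths.map (fun w => List.replicate (w + 2) '-')) ++ ['+']
  String.ofList (PySem.Chars.join ['\n']
    ([sep, pvFmtRowB widths headers, sep] ++ rows.map (pvFmtRowB widths) ++ [sep]))

-- ===== PRECONDITION & SPEC =====
def Spec_simple_ascii_table (headers : List String) (rows : List (List String)) (out : String) : Prop := out = simple_ascii_table_alt headers rows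
instance (headers : List String) (rows : List (List String)) (out : String) : Decidable (Spec_simple_ascii_table headers rows out) := by unfold Spec_simple_ascii_table; infer_instance

-- ===== CLAIM (what is proved, stated in full; the proofs are below) =====
def Claim_equal_simple_ascii_table : Prop := ∀ (headers : List String) (rows : List (List String)), Dom_simple_ascii_table headers rows → Spec_simple_ascii_table headers rows (simple_ascii_table headers rows)

-- ===== LEMMAS AND PROOFS =====

-- proof-only: len(r[j]) if j < len(r) else 0, the merged per-column cell length
def pvCellLen (r : List String) (j : Nat) : Nat := (r.getD j "").toList.length

theorem pvCellLen_of_le (r : List String) (j : Nat) (h : r.length ≤ j) : pvCellLen r j = 0 := by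
  simp only [pvCellLen, List.getD_eq_getElem?_getD, List.getElem?_eq_none (by omega : r.length ≤ j)]
  rfl

theorem pvCellLen_cons_succ (c : String) (r : List String) (m : Nat) :
    pvCellLen (c :: r) (m + 1) = pvCellLen r m := rfl

theorem self_eq_range_map_getD (ws : List Nat) :
    ws = (List.range ws.length).map (fun j => ws.getD j 0) := by
  apply List.ext_getElem
  · simp
  · intro i p q; simp [List.getD_eq_getElem?_getD, List.getElem?_eq_getElem p]

theorem pvStepA_inner (r : List String) :
    ∀ (k : Nat) (ws : List Nat), k ≤ ws.length →
    (r.zipIdx k).foldl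
        (fun ws ci =>
          if ws.length ≤ ci.2 then ws ++ [ci.1.toList.length]
          else ws.set ci.2 (max (ws.getD ci.2 0) ci.1.toList.length)) ws
      = (List.range (max ws.length (k + r.length))).map
          (fun j => if j < k then ws.getD j 0 else max (ws.getD j 0) (pvCellLen r (j - k))) := by
  induction r with
  | nil =>
      intro k ws hk
      simp only [List.zipIdx_nil, List.foldl_nil, List.length_nil, Nat.add_zero]
      rw [Nat.max_eq_left hk]
      nth_rewrite 1 [self_eq_range_map_getD ws]
      apply List.map_congr_left
      intro j hj
      simp only [List.mem_range] at hj
      split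
      · rfl
      · rw [pvCellLen_of_le [] _ (by simp), Nat.max_eq_left (Nat.zero_le _)]
  | cons c r ih =>
      intro k ws hk
      rw [List.zipIdx_cons, List.foldl_cons]
      by_cases hkl : ws.length ≤ k
      · have hke : k = ws.length := le_antisymm hk hkl
        simp only [if_pos hkl]
        rw [ih (k+1) (ws ++ [c.toList.length]) (by simp; omega)]
        apply List.ext_getElem
        · simp; omega
        · intro j p q
          simp only [List.length_map, List.length_range, List.length_append, List.length_cons] at p q
          simp only [List.getElem_map, List.getElem_range]
          by_cases hjk : j < k
          · have hjw : j < ws.length := by omega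
            rw [if_pos (by omega : j < k + 1), if_pos hjk]
            rw [List.getD_eq_getElem?_getD, List.getElem?_append_left hjw,
                ← List.getD_eq_getElem?_getD]
          · by_cases hjk1 : j = k
            · subst hjk1
              rw [if_pos (by omega : j < j + 1), if_neg (by omega : ¬ j < j), Nat.sub_self]
              have h0 : ws.getD j 0 = 0 := by
                rw [List.getD_eq_getElem?_getD, List.getElem?_eq_none (by omega)]; rfl
              have h1 : (ws ++ [c.toList.length]).getD j 0 = c.toList.length := by
                rw [List.getD_eq_getElem?_getD, List.getElem?_append_right (by omega), hke]
                simp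
              rw [h0, h1]
              have : pvCellLen (c :: r) 0 = c.toList.length := rfl
              rw [this, Nat.zero_max]
            · rw [if_neg (by omega : ¬ j < k + 1), if_neg (by omega : ¬ j < k)]
              have h1 : (ws ++ [c.toList.length]).getD j 0 = 0 := by
                rw [List.getD_eq_getElem?_getD, List.getElem?_eq_none (by simp; omega)]; rfl
              have h2 : ws.getD j 0 = 0 := by
                rw [List.getD_eq_getElem?_getD, List.getElem?_eq_none (by omega)]; rfl
              rw [h1, h2]
              have hjj : j - k = (j - (k+1)) + 1 := by omega
              rw [hjj, pvCellLen_cons_succ]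
      · simp only [if_neg hkl]
        rw [ih (k+1) (ws.set k (max (ws.getD k 0) c.toList.length)) (by simp; omega)]
        apply List.ext_getElem
        · simp; omega
        · intro j p q
          simp only [List.length_map, List.length_range, List.length_cons, List.length_set] at p q
          simp only [List.getElem_map, List.getElem_range]
          by_cases hjk : j < k
          · rw [if_pos (by omega : j < k + 1), if_pos hjk]
            simp only [List.getD_eq_getElem?_getD, List.getElem?_set_ne (by omega : k ≠ j)]
          · by_cases hjk1 : j = k
            · subst hjk1
              rw [if_pos (by omega : j < j + 1), if_neg (by omega : ¬ j < j), Nat.sub_self]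
              have hset : (ws.set j (max (ws.getD j 0) c.toList.length)).getD j 0
                  = max (ws.getD j 0) c.toList.length := by
                simp only [List.getD_eq_getElem?_getD]
                rw [List.getElem?_set_self' ]
                simp [List.getElem?_eq_getElem (by omega : j < ws.length)]
              rw [hset]
              have : pvCellLen (c :: r) 0 = c.toList.length := rfl
              rw [this]
            · rw [if_neg (by omega : ¬ j < k + 1), if_neg (by omega : ¬ j < k)]
              have hset : (ws.set k (max (ws.getD k 0) c.toList.length)).getD j 0 = ws.getD j 0 := by
                simp only [List.getD_eq_getElem?_getD, List.getElem?_set_ne (by omega : k ≠ j)]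
              rw [hset]
              have hjj : j - k = (j - (k+1)) + 1 := by omega
              rw [hjj, pvCellLen_cons_succ]

theorem pvStepA_eq (ws : List Nat) (r : List String) :
    pvStepA ws r = (List.range (max ws.length r.length)).map
      (fun j => max (ws.getD j 0) (pvCellLen r j)) := by
  unfold pvStepA
  rw [pvStepA_inner r 0 ws (Nat.zero_le _)]
  simp only [Nat.zero_add]
  apply List.map_congr_left
  intro j _
  rw [if_neg (Nat.not_lt_zero j), Nat.sub_zero]

theorem pvStepA_len (ws : List Nat) (r : List String) :
    (pvStepA ws r).length = max ws.length r.length := by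
  rw [pvStepA_eq, List.length_map, List.length_range]

theorem pvStepA_getD (ws : List Nat) (r : List String) (j : Nat) :
    (pvStepA ws r).getD j 0 = max (ws.getD j 0) (pvCellLen r j) := by
  rw [pvStepA_eq]
  rcases Nat.lt_or_ge j (max ws.length r.length) with h | h
  · rw [List.getD_eq_getElem?_getD, List.getElem?_map, List.getElem?_range h]
    rfl
  · have hlen : ((List.range (max ws.length r.length)).map
        (fun j => max (ws.getD j 0) (pvCellLen r j))).length ≤ j := by simpa using h
    rw [List.getD_eq_getElem?_getD, List.getElem?_eq_none hlen]
    have h1 : ws.getD j 0 = 0 := by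
      rw [List.getD_eq_getElem?_getD, List.getElem?_eq_none (by omega)]; rfl
    have h2 : pvCellLen r j = 0 := pvCellLen_of_le r j (by omega)
    rw [h1, h2]
    rfl

theorem foldA_widths (rows : List (List String)) :
    ∀ ws : List Nat,
    rows.foldl pvStepA ws
      = (List.range (rows.foldl (fun n r => max n r.length) ws.length)).map
          (fun j => rows.foldl (fun m r => max m (pvCellLen r j)) (ws.getD j 0)) := by
  induction rows with
  | nil => intro ws; simpa using self_eq_range_map_getD ws
  | cons r rows ih =>
      intro ws
      rw [List.foldl_cons, ih (pvStepA ws r)]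
      simp only [pvStepA_len, pvStepA_getD, List.foldl_cons]

-- the initial accumulator [len(h) for h in headers], read back through getD
theorem map_len_getD (headers : List String) (j : Nat) :
    (headers.map (fun h => h.toList.length)).getD j 0 = pvCellLen headers j := by
  rcases Nat.lt_or_ge j headers.length with h | h
  · rw [List.getD_eq_getElem?_getD, List.getElem?_map,
        List.getElem?_eq_getElem h]
    simp [pvCellLen, List.getD_eq_getElem?_getD, List.getElem?_eq_getElem h]
  · rw [List.getD_eq_getElem?_getD, List.getElem?_eq_none (by simpa using h),
        pvCellLen_of_le headers j h]
    rfl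

-- A's width loop equals B's transpose-style column maxima
theorem widths_eq (headers : List String) (rows : List (List String)) :
    rows.foldl pvStepA (headers.map (fun h => h.toList.length))
      = (List.range (((headers :: rows).map List.length).foldl max 0)).map
          (fun j => ((headers :: rows).map (fun r => pvCellLen r j)).foldl max 0) := by
  rw [foldA_widths]
  simp only [List.foldl_map, List.foldl_cons, Nat.zero_max, List.length_map, map_len_getD]

theorem foldl_max_shift (l : List Nat) (a : Nat) : l.foldl max a = max a (l.foldl max 0) := by
  have h := List.foldl_assoc (op := max) (l := l) (a₁ := a) (a₂ := 0)
  simpa using h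

theorem maxlen_filterMap (grid : List (List String)) (j : Nat) :
    (((grid.filterMap (fun r => r[j]?)).map (fun s => s.toList.length)).foldl max 0)
      = ((grid.map (fun r => pvCellLen r j)).foldl max 0) := by
  induction grid with
  | nil => rfl
  | cons r grid ih =>
      rcases Nat.lt_or_ge j r.length with h | h
      · rw [List.filterMap_cons, List.getElem?_eq_getElem h]
        simp only [List.map_cons, List.foldl_cons]
        rw [foldl_max_shift _ (max 0 _), foldl_max_shift _ (max 0 _), ih]
        have : pvCellLen r j = r[j].toList.length := by
          simp [pvCellLen, List.getD_eq_getElem?_getD, List.getElem?_eq_getElem h]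
        rw [this]
      · rw [List.filterMap_cons, List.getElem?_eq_none h]
        simp only [List.map_cons, List.foldl_cons, pvCellLen_of_le r j h]
        rw [ih, Nat.max_self]

theorem pvColsStep_inner_len (r : List String) :
    ∀ (k : Nat) (cols : List (List String)),
    ((r.zipIdx k).foldl (fun cols ci => cols.set ci.2 (cols.getD ci.2 [] ++ [ci.1])) cols).length
      = cols.length := by
  induction r with
  | nil => intro k cols; rfl
  | cons c r ih =>
      intro k cols
      rw [List.zipIdx_cons, List.foldl_cons, ih (k+1), List.length_set]

theorem pvColsStep_inner_getD (r : List String) :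
    ∀ (k : Nat) (cols : List (List String)) (j : Nat), k + r.length ≤ cols.length →
    ((r.zipIdx k).foldl (fun cols ci => cols.set ci.2 (cols.getD ci.2 [] ++ [ci.1])) cols).getD j []
      = cols.getD j [] ++ (if k ≤ j then (r[j - k]?).toList else []) := by
  induction r with
  | nil =>
      intro k cols j _
      simp only [List.zipIdx_nil, List.foldl_nil, List.getElem?_nil, Option.toList_none]
      split <;> simp
  | cons c r ih =>
      intro k cols j hk
      simp only [List.length_cons] at hk
      rw [List.zipIdx_cons, List.foldl_cons]
      have hklt : k < cols.length := by omega
      rw [ih (k+1) _ j (by rw [List.length_set]; omega)]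
      by_cases hjk : j < k
      · rw [if_neg (by omega : ¬ k + 1 ≤ j), if_neg (by omega : ¬ k ≤ j)]
        simp only [List.getD_eq_getElem?_getD, List.getElem?_set_ne (by omega : k ≠ j),
          List.append_nil]
      · by_cases hjk1 : j = k
        · subst hjk1
          rw [if_neg (by omega : ¬ j + 1 ≤ j), if_pos (le_refl j), Nat.sub_self]
          simp only [List.getD_eq_getElem?_getD, List.getElem?_set_self hklt,
            List.getElem?_cons_zero, Option.getD_some, Option.toList_some, List.append_nil]
        · rw [if_pos (by omega : k + 1 ≤ j), if_pos (by omega : k ≤ j)]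
          have hset : (cols.set k (cols.getD k [] ++ [c])).getD j [] = cols.getD j [] := by
            simp only [List.getD_eq_getElem?_getD, List.getElem?_set_ne (by omega : k ≠ j)]
          rw [hset]
          have hjj : j - k = (j - (k+1)) + 1 := by omega
          rw [hjj, List.getElem?_cons_succ]

theorem pvColsFold_len (grid : List (List String)) :
    ∀ cols : List (List String), (grid.foldl pvColsStep cols).length = cols.length := by
  induction grid with
  | nil => intro cols; rfl
  | cons r grid ih => intro cols; rw [List.foldl_cons, ih, pvColsStep, pvColsStep_inner_len]

theorem pvColsFold_getD (grid : List (List String)) :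
    ∀ (cols : List (List String)) (j : Nat), (∀ r ∈ grid, r.length ≤ cols.length) →
    (grid.foldl pvColsStep cols).getD j []
      = cols.getD j [] ++ grid.filterMap (fun r => r[j]?) := by
  induction grid with
  | nil => intro cols j _; simp
  | cons r grid ih =>
      intro cols j hlen
      rw [List.foldl_cons, ih _ j (by
        intro r' hr'
        rw [pvColsStep, pvColsStep_inner_len]
        exact hlen r' (List.mem_cons_of_mem r hr'))]
      rw [pvColsStep, pvColsStep_inner_getD r 0 cols j
        (by simpa using hlen r (List.mem_cons_self))]
      rw [if_pos (Nat.zero_le j), Nat.sub_zero, List.filterMap_cons]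
      cases h : r[j]? with
      | none => simp
      | some s => simp

-- B's cols is exactly the range-indexed transpose
theorem pvCols_eq (grid : List (List String)) (ncols : Nat)
    (hlen : ∀ r ∈ grid, r.length ≤ ncols) :
    grid.foldl pvColsStep (List.replicate ncols ([] : List String))
      = (List.range ncols).map (fun j => grid.filterMap (fun r => r[j]?)) := by
  apply List.ext_getElem
  · rw [pvColsFold_len, List.length_replicate, List.length_map, List.length_range]
  · intro j p q
    rw [pvColsFold_len, List.length_replicate] at p
    have h1 : (grid.foldl pvColsStep (List.replicate ncols ([] : List String))).getD j []
        = (List.replicate ncols ([] : List String)).getD j [] ++ grid.filterMap (fun r => r[j]?) := by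
      apply pvColsFold_getD
      intro r hr; simpa using hlen r hr
    have h2 : (List.replicate ncols ([] : List String)).getD j [] = [] := by
      rw [List.getD_eq_getElem?_getD, List.getElem?_replicate]
      simp [p]
    rw [List.getD_eq_getElem?_getD, List.getElem?_eq_getElem (by rwa [pvColsFold_len, List.length_replicate])] at h1
    simp only [Option.getD_some] at h1
    rw [h1, h2, List.nil_append, List.getElem_map, List.getElem_range]


theorem pvFmtRow_eq (ws : List Nat) (r : List String) : pvFmtRowA ws r = pvFmtRowB ws r := by
  simp only [pvFmtRowA, pvFmtRowB, PySem.List.foldl_append_singleton_eq_map, List.nil_append]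

-- B's per-column maxima over the materialized transpose equal A's width loop
theorem widthsB_eq (headers : List String) (rows : List (List String)) :
    ((headers :: rows).foldl pvColsStep
        (List.replicate (((headers :: rows).map List.length).foldl max 0) ([] : List String))).map
        (fun col => (col.map (fun c => c.toList.length)).foldl max 0)
      = rows.foldl pvStepA (headers.map (fun h => h.toList.length)) := by
  rw [pvCols_eq _ _ (fun r hr => by
        rw [List.foldl_map]
        exact (PySem.List.le_foldl_max_nat _ List.length 0).2 r hr),
      List.map_map, widths_eq]
  apply List.map_congr_left
  intro j _
  exact maxlen_filterMap (headers :: rows) j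

-- ===== VERDICT (by name: the statement is the Claim_ definition above) =====
theorem simple_ascii_table_spec : Claim_equal_simple_ascii_table := by
  intro headers rows _
  simp only [Spec_simple_ascii_table, simple_ascii_table, simple_ascii_table_alt,
    widthsB_eq, pvFmtRow_eq, PySem.List.foldl_append_singleton_eq_map,
    List.cons_append, List.nil_append]
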